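-- pv_equiv track=rewrite | github.com/am17an/ProjectEuler | 189.py | generate_triangular_grid
-- ===== SOURCE A (Python) =====
-- def generate_triangular_grid(n):
--    """Generate list of triangles and their neighbors for n rows"""
--    triangles = []
--    neighbors = {}
--
--    # Generate all triangles
--    triangle_id = 0
--    id_map = {}
--
--    for row in range(n):
--        for col in range(2 * row + 1):
--            triangles.append((row, col))
--            id_map[(row, col)] = triangle_id
--            neighbors[triangle_id] = []
--            triangle_id += 1
--
--    # Find neighbors for each triangle
--    for row in range(n):
--        for col in range(2 * row + 1):
--            current_id = id_map[(row, col)]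
--
--            # Check if triangle points up (even col) or down (odd col)
--            points_up = (col % 2 == 1)
--
--            # Add left and right neighbors for all triangles
--            adjacent_positions = [
--                (row, col - 1),  # left
--                (row, col + 1),  # right
--            ]
--
--            # Add third neighbor based on orientation
--            if points_up:
--                # Upward triangles have a neighbor above
--                adjacent_positions.append((row - 1, col - 1))
--            else:
--                # Downward triangles have a neighbor below
--                adjacent_positions.append((row + 1, col + 1))
--
--            for adj_row, adj_col in adjacent_positions:
--                if (adj_row, adj_col) in id_map:
--                    if 0 <= adj_row < n and 0 <= adj_col < 2 * adj_row + 1: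
--                        neighbors[current_id].append(id_map[(adj_row, adj_col)])
--
--    return len(triangles), neighbors
-- ===== SOURCE B (Python) =====
-- def generate_triangular_grid(n):
--     """Generate list of triangles and their neighbors for n rows"""
--     size = n * n if n > 0 else 0
--     neighbors = {}
--     row = col = 0
--     for t in range(size):
--         if col == 2 * row + 1:
--             row += 1
--             col = 0
--         adj = []
--         if col > 0:
--             adj.append(t - 1)
--         if col < 2 * row:
--             adj.append(t + 1)
--         if col % 2 == 1:
--             adj.append(t - 2 * row)
--         elif row + 1 < n:
--             adj.append(t + 2 * row + 2)
--         neighbors[t] = adj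
--         col += 1
--     return size, neighbors
-- ===== Notes on version B (the rewrite author's own statement) =====
-- stated objective: faster
-- what changed: A single flat loop over triangle ids 0..n*n-1 with row/col counters, computing each neighbor id by pure offset arithmetic (t-1, t+1, t-2*row or t+2*row+2) guarded by boundary tests on the counters; no coordinate tuples, no id_map/membership dictionaries, no second pass.
import Mathlib
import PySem

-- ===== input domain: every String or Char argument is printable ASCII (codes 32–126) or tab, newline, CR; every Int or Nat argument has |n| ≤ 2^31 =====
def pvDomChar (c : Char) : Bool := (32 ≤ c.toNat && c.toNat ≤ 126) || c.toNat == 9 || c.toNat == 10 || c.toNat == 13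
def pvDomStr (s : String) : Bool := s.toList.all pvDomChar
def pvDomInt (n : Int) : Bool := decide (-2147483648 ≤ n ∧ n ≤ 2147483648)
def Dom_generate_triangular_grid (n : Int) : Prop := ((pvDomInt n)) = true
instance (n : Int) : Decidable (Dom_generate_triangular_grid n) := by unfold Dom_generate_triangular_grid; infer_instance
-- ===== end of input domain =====

-- B is one flat loop over triangle ids with row/col counters and pure offset arithmetic for the
-- neighbor ids, replacing A's two coordinate passes and its id_map/membership dictionaries.

-- ===== PORT A =====
def generate_triangular_grid (n : Int) : Int × (List (Int × List Int)) :=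
  -- first pass: state (triangles, neighbors, triangle_id, id_map)
  let s := (PySem.List.pyRange 0 n 1).foldl (fun s row =>
      (PySem.List.pyRange 0 (2 * row + 1) 1).foldl (fun s col =>
        -- s = (triangles, neighbors, triangle_id, id_map)
        (s.1 ++ [(row, col)], s.2.1.insert s.2.2.1 [], s.2.2.1 + 1,
          s.2.2.2.insert (row, col) s.2.2.1)) s)
    (([] : List (Int × Int)), (PySem.Dict.empty : PySem.Dict Int (List Int)),
      (0 : Int), (PySem.Dict.empty : PySem.Dict (Int × Int) Int))
  let triangles := s.1
  let id_map := s.2.2.2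
  -- second pass
  let neighbors := (PySem.List.pyRange 0 n 1).foldl (fun nb row =>
      (PySem.List.pyRange 0 (2 * row + 1) 1).foldl (fun nb col =>
        -- id_map[(row, col)]: the key is always present, so getD never takes its default
        let current_id := id_map.getD (row, col) 0
        let adjacent_positions := [(row, col - 1), (row, col + 1)] ++
          (if PySem.Int.mod col 2 == 1 then [(row - 1, col - 1)] else [(row + 1, col + 1)])
        adjacent_positions.foldl (fun nb p =>
          if id_map.contains p then
            if 0 ≤ p.1 && p.1 < n && 0 ≤ p.2 && p.2 < 2 * p.1 + 1 then
              -- neighbors[current_id].append(...): key always present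
              nb.modify current_id [] (fun l => l ++ [id_map.getD p 0])
            else nb
          else nb) nb) nb)
    s.2.1
  ((triangles.length : Int), neighbors.items)

-- ===== PORT B =====
def generate_triangular_grid_alt (n : Int) : Int × (List (Int × List Int)) :=
  let size : Int := if n > 0 then n * n else 0
  -- flat loop over ids t; state (neighbors-as-assoc-list (keys t are fresh and increasing), row, col)
  let s := (PySem.List.pyRange 0 size 1).foldl (fun s t =>
      let rc := if s.2.2 == 2 * s.2.1 + 1 then (s.2.1 + 1, (0 : Int)) else (s.2.1, s.2.2)
      let row := rc.1
      let col := rc.2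
      let adj := (if col > 0 then [t - 1] else []) ++
        (if col < 2 * row then [t + 1] else []) ++
        (if PySem.Int.mod col 2 == 1 then [t - 2 * row]
         else if row + 1 < n then [t + 2 * row + 2] else [])
      (s.1 ++ [(t, adj)], row, col + 1))
    (([] : List (Int × List Int)), (0 : Int), (0 : Int))
  (size, s.1)

-- ===== PRECONDITION & SPEC =====
def Spec_generate_triangular_grid (n : Int) (out : Int × (List (Int × List Int))) : Prop := out = generate_triangular_grid_alt n
instance (n : Int) (out : Int × (List (Int × List Int))) : Decidable (Spec_generate_triangular_grid n out) := by unfold Spec_generate_triangular_grid; infer_instance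

-- ===== CLAIM (what is proved, stated in full; the proofs are below) =====
def Claim_equal_generate_triangular_grid : Prop := ∀ (n : Int), Dom_generate_triangular_grid n → Spec_generate_triangular_grid n (generate_triangular_grid n)

-- ===== LEMMAS AND PROOFS =====

-- helper definitions used only by the proofs
def pvId (rc : Int × Int) : Int := rc.1 * rc.1 + rc.2

def pvIn (n : Int) (p : Int × Int) : Bool :=
  0 ≤ p.1 && p.1 < n && 0 ≤ p.2 && p.2 < 2 * p.1 + 1

def pvBlk (r : Int) : List (Int × Int) :=
  (PySem.List.pyRange 0 (2 * r + 1) 1).map (fun c => (r, c))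

def pvCells (n : Int) : List (Int × Int) :=
  (PySem.List.pyRange 0 n 1).flatMap pvBlk

theorem pvMap_add_pyRange (a k : Int) :
    (PySem.List.pyRange 0 k 1).map (fun c => a + c) = PySem.List.pyRange a (a + k) 1 := by
  simp [PySem.List.pyRange_one, List.map_map, Function.comp_def]

theorem pvBlk_map_id (r : Int) :
    (pvBlk r).map pvId = PySem.List.pyRange (r * r) (r * r + (2 * r + 1)) 1 := by
  rw [← pvMap_add_pyRange]
  simp [pvBlk, List.map_map, Function.comp_def, pvId]

theorem pvCells_succ (m : Nat) :
    pvCells ((m : Int) + 1) = pvCells (m : Int) ++ pvBlk (m : Int) := by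
  unfold pvCells
  rw [PySem.List.pyRange_one_succ_right (by positivity)]
  simp

theorem pvCells_map_id (m : Nat) :
    (pvCells (m : Int)).map pvId = PySem.List.pyRange 0 ((m : Int) * (m : Int)) 1 := by
  induction m with
  | zero => simp [pvCells, PySem.List.pyRange_one_eq_nil (by norm_num : (0:Int) ≤ 0)]
  | succ m ih =>
    push_cast
    rw [pvCells_succ m, List.map_append, ih, pvBlk_map_id,
      show ((m:Int)+1) * ((m:Int)+1) = (m:Int)*(m:Int) + (2*(m:Int)+1) by ring,
      ← PySem.List.pyRange_one_append 0 ((m:Int)*(m:Int)) ((m:Int)*(m:Int) + (2*(m:Int)+1))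
        (by positivity) (by nlinarith [Int.natCast_nonneg m])]

theorem pvMem_cells (n : Int) (p : Int × Int) : p ∈ pvCells n ↔ pvIn n p = true := by
  obtain ⟨r, c⟩ := p
  simp only [pvCells, pvBlk, pvIn, List.mem_flatMap, List.mem_map,
    PySem.List.mem_pyRange_one, Bool.and_eq_true, decide_eq_true_eq, Prod.mk.injEq]
  constructor
  · rintro ⟨r', ⟨h1, h2⟩, c', ⟨h3, h4⟩, rfl, rfl⟩
    omega
  · rintro ⟨⟨⟨h1, h2⟩, h3⟩, h4⟩
    exact ⟨r, ⟨h1, h2⟩, c, ⟨h3, h4⟩, rfl, rfl⟩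

theorem pvNodup_ids (m : Nat) : ((pvCells (m : Int)).map pvId).Nodup := by
  rw [pvCells_map_id]; exact PySem.List.nodup_pyRange_one _ _

theorem pvNodup_cells (m : Nat) : (pvCells (m : Int)).Nodup :=
  (pvNodup_ids m).of_map

theorem pvId_lt (m : Nat) (rc : Int × Int) (h : rc ∈ pvCells (m : Int)) :
    0 ≤ pvId rc ∧ pvId rc < (m : Int) * (m : Int) := by
  have : pvId rc ∈ (pvCells (m : Int)).map pvId := List.mem_map_of_mem h
  rw [pvCells_map_id, PySem.List.mem_pyRange_one] at this
  exact this

theorem pvInsert_fresh {κ ν : Type} [BEq κ] [LawfulBEq κ] (L : List (κ × ν)) (k : κ) (v : ν)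
    (h : k ∉ L.map Prod.fst) :
    (PySem.Dict.mk L).insert k v = PySem.Dict.mk (L ++ [(k, v)]) := by
  have hc : (PySem.Dict.mk L).contains k = false := by
    rw [Bool.eq_false_iff, Ne, PySem.Dict.contains_iff_mem_keys]
    simpa [PySem.Dict.keys] using h
  exact PySem.Dict.ext (PySem.Dict.items_insert_of_not_contains _ _ hc)

-- the first pass over one row, from a generic state with fresh ids and an unseen row
theorem pvPass1Inner (r : Int) (k : Nat) (tris : List (Int × Int))
    (nbl : List (Int × List Int)) (t : Int) (iml : List ((Int × Int) × Int))
    (hnb : ∀ q ∈ nbl, q.1 < t) (him : ∀ q ∈ iml, q.1.1 ≠ r) :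
    (PySem.List.pyRange 0 (k : Int) 1).foldl
      (fun s col => (s.1 ++ [(r, col)], s.2.1.insert s.2.2.1 [], s.2.2.1 + 1,
        s.2.2.2.insert (r, col) s.2.2.1))
      (tris, PySem.Dict.mk nbl, t, PySem.Dict.mk iml)
    = (tris ++ (List.range k).map (fun (c : Nat) => (r, (c : Int))),
       PySem.Dict.mk (nbl ++ (List.range k).map (fun (c : Nat) => (t + (c : Int), ([] : List Int)))),
       t + (k : Int),
       PySem.Dict.mk (iml ++ (List.range k).map (fun (c : Nat) => ((r, (c : Int)), t + (c : Int))))) := by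
  induction k with
  | zero =>
    simp [PySem.List.pyRange_one_eq_nil (le_refl (0 : Int))]
  | succ k ih =>
    rw [show ((k + 1 : Nat) : Int) = (k : Int) + 1 by push_cast; ring,
      PySem.List.pyRange_one_succ_right (by positivity), List.foldl_append, ih]
    simp only [List.foldl_cons, List.foldl_nil]
    have h1 : (t + (k : Int)) ∉
        (nbl ++ (List.range k).map (fun (c : Nat) => (t + (c : Int), ([] : List Int)))).map Prod.fst := by
      intro hmem
      obtain ⟨q, hq, hqe⟩ := List.mem_map.mp hmem
      rcases List.mem_append.mp hq with hql | hqr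
      · have := hnb q hql; omega
      · obtain ⟨c, hc, rfl⟩ := List.mem_map.mp hqr
        have := List.mem_range.mp hc
        omega
    have h2 : ((r, (k : Int))) ∉
        (iml ++ (List.range k).map (fun (c : Nat) => ((r, (c : Int)), t + (c : Int)))).map Prod.fst := by
      intro hmem
      obtain ⟨q, hq, hqe⟩ := List.mem_map.mp hmem
      rcases List.mem_append.mp hq with hql | hqr
      · exact him q hql (by rw [hqe])
      · obtain ⟨c, hc, rfl⟩ := List.mem_map.mp hqr
        have := List.mem_range.mp hc
        simp only [Prod.mk.injEq] at hqe
        omega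
    rw [pvInsert_fresh _ _ _ h1, pvInsert_fresh _ _ _ h2]
    simp only [List.range_succ, List.map_append, List.map_cons, List.map_nil,
      List.append_assoc, Prod.mk.injEq]
    exact ⟨trivial, trivial, by omega, trivial⟩

theorem pvPass1 (m : Nat) :
    (PySem.List.pyRange 0 (m : Int) 1).foldl (fun s row =>
      (PySem.List.pyRange 0 (2 * row + 1) 1).foldl (fun s col =>
        (s.1 ++ [(row, col)], s.2.1.insert s.2.2.1 [], s.2.2.1 + 1,
          s.2.2.2.insert (row, col) s.2.2.1)) s)
      (([] : List (Int × Int)), (PySem.Dict.empty : PySem.Dict Int (List Int)),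
        (0 : Int), (PySem.Dict.empty : PySem.Dict (Int × Int) Int))
    = (pvCells (m : Int),
       PySem.Dict.mk ((pvCells (m : Int)).map (fun rc => (pvId rc, []))),
       (m : Int) * (m : Int),
       PySem.Dict.mk ((pvCells (m : Int)).map (fun rc => (rc, pvId rc)))) := by
  induction m with
  | zero =>
    simp [PySem.List.pyRange_one_eq_nil (le_refl (0 : Int)), pvCells, PySem.Dict.empty]
  | succ m ih =>
    rw [show ((m + 1 : Nat) : Int) = (m : Int) + 1 by push_cast; ring,
      PySem.List.pyRange_one_succ_right (by positivity), List.foldl_append, ih]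
    simp only [List.foldl_cons, List.foldl_nil]
    rw [show (2 * (m : Int) + 1) = ((2 * m + 1 : Nat) : Int) by push_cast; ring]
    rw [pvPass1Inner (m : Int) (2 * m + 1) _ _ _ _
      (by
        rintro q hq
        simp only [List.mem_map] at hq
        obtain ⟨rc, hrc, rfl⟩ := hq
        exact (pvId_lt m rc hrc).2)
      (by
        rintro q hq
        simp only [List.mem_map] at hq
        obtain ⟨rc, hrc, rfl⟩ := hq
        have := (pvMem_cells _ rc).mp hrc
        simp only [pvIn, Bool.and_eq_true, decide_eq_true_eq] at this
        show rc.1 ≠ (m : Int)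
        omega)]
    rw [pvCells_succ m]
    have hblk : (List.range (2 * m + 1)).map (fun (c : Nat) => ((m : Int), (c : Int))) = pvBlk (m : Int) := by
      rw [pvBlk, show (2 * (m : Int) + 1) = ((2 * m + 1 : Nat) : Int) by push_cast; ring,
        PySem.List.pyRange_zero_nat, List.map_map]
      simp [Function.comp_def]
    refine Prod.ext ?_ (Prod.ext ?_ (Prod.ext ?_ ?_)) <;>
      simp only [List.map_append]
    · rw [hblk]
    · rw [← hblk]
      simp [List.map_map, Function.comp_def, pvId]
    · push_cast; ring
    · rw [← hblk]
      simp [List.map_map, Function.comp_def, pvId]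

def pvRaw (row col : Int) : List (Int × Int) :=
  [(row, col - 1), (row, col + 1)] ++
    (if PySem.Int.mod col 2 == 1 then [(row - 1, col - 1)] else [(row + 1, col + 1)])

def pvIM (n : Int) : PySem.Dict (Int × Int) Int :=
  PySem.Dict.mk ((pvCells n).map (fun rc => (rc, pvId rc)))

def pvNB0 (n : Int) : PySem.Dict Int (List Int) :=
  PySem.Dict.mk ((pvCells n).map (fun rc => (pvId rc, ([] : List Int))))

theorem pvIM_keys (n : Int) : (pvIM n).keys = pvCells n := by
  simp [pvIM, PySem.Dict.keys, List.map_map, Function.comp_def]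

theorem pvIM_contains (n : Int) (p : Int × Int) : (pvIM n).contains p = pvIn n p := by
  rw [PySem.Dict.contains_eq_decide_mem_keys, pvIM_keys]
  cases hb : pvIn n p with
  | true => simp [(pvMem_cells n p).mpr hb]
  | false =>
    simp only [decide_eq_false_iff_not]
    intro hmem
    rw [(pvMem_cells n p).mp hmem] at hb
    exact Bool.true_eq_false.mp hb

theorem pvIM_getD (m : Nat) (rc : Int × Int) (h : rc ∈ pvCells (m : Int)) :
    (pvIM (m : Int)).getD rc 0 = pvId rc := by
  apply PySem.Dict.getD_of_mem_items
  · exact List.mem_map_of_mem h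
  · rw [pvIM_keys]; exact pvNodup_cells m

theorem pvNB0_keys (n : Int) : (pvNB0 n).keys = (pvCells n).map pvId := by
  simp [pvNB0, PySem.Dict.keys]

theorem pvNB0_getD (m : Nat) (rc : Int × Int) (h : rc ∈ pvCells (m : Int)) :
    (pvNB0 (m : Int)).getD (pvId rc) [] = [] := by
  apply PySem.Dict.getD_of_mem_items
  · exact List.mem_map_of_mem h
  · rw [pvNB0_keys]; exact pvNodup_ids m

-- loop-shape: two nested Python loops over a dict are one fold over the flattened list
theorem pvFoldFlat {α β σ : Type} (L : List α) (g : α → List β) (f : σ → β → σ) (init : σ) :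
    L.foldl (fun s a => (g a).foldl f s) init = (L.flatMap g).foldl f init := by
  induction L generalizing init with
  | nil => rfl
  | cons h t ih => simp [List.foldl_append, ih]

-- loop-shape: guarded modifies are a fold of modifies over the filtered pair list
theorem pvIf2 (l : List (Int × Int)) (P Q : Int × Int → Bool) (K : Int) (V : Int × Int → Int)
    (d : PySem.Dict Int (List Int)) :
    l.foldl (fun d a => if P a = true then (if Q a = true then
        d.modify K [] (fun lst => lst ++ [V a]) else d) else d) d
    = ((l.filter (fun a => P a && Q a)).map (fun a => (K, V a))).foldl
        (fun d u => d.modify u.1 [] (fun lst => lst ++ [u.2])) d := by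
  induction l generalizing d with
  | nil => rfl
  | cons h t ih =>
    cases hp : P h <;> cases hq : Q h <;> simp [hp, hq, ih]

-- the per-cell update pairs of the second pass
def pvUpd (n : Int) : List (Int × Int) :=
  (pvCells n).flatMap (fun rc => ((pvRaw rc.1 rc.2).filter (pvIn n)).map
    (fun p => (pvId rc, pvId p)))

theorem pvUpd_fst (n : Int) (u : Int × Int) (h : u ∈ pvUpd n) :
    ∃ rc ∈ pvCells n, u.1 = pvId rc := by
  simp only [pvUpd, List.mem_flatMap, List.mem_map] at h
  obtain ⟨rc, hrc, p, _, rfl⟩ := h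
  exact ⟨rc, hrc, rfl⟩

theorem pvFilterBlocks (L : List (Int × Int)) (A : Int × Int → List (Int × Int))
    (rc : Int × Int) (hnd : (L.map pvId).Nodup) (hrc : rc ∈ L) :
    (L.flatMap (fun rc' => (A rc').map (fun p => (pvId rc', pvId p)))).filter
        (fun u => u.1 == pvId rc)
    = (A rc).map (fun p => (pvId rc, pvId p)) := by
  induction L with
  | nil => simp at hrc
  | cons hd tl ih =>
    rw [List.flatMap_cons, List.filter_append]
    simp only [List.map_cons, List.nodup_cons] at hnd
    rcases List.mem_cons.mp hrc with rfl | htl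
    · have h1 : ((A rc).map (fun p => (pvId rc, pvId p))).filter (fun u => u.1 == pvId rc)
          = (A rc).map (fun p => (pvId rc, pvId p)) := by
        rw [List.filter_map]
        have : ((fun (u : Int × Int) => u.1 == pvId rc) ∘ (fun p => (pvId rc, pvId p)))
            = fun _ => true := by
          funext p; simp
        rw [this, List.filter_true]
      have h2 : ((tl.flatMap (fun rc' => (A rc').map (fun p => (pvId rc', pvId p))))).filter
          (fun u => u.1 == pvId rc) = [] := by
        rw [List.filter_eq_nil_iff]
        intro u hu
        simp only [List.mem_flatMap, List.mem_map] at hu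
        obtain ⟨rc', hrc', p, _, rfl⟩ := hu
        simp only [beq_iff_eq]
        intro he
        exact hnd.1 (he ▸ List.mem_map_of_mem hrc')
      rw [h1, h2, List.append_nil]
    · have h1 : ((A hd).map (fun p => (pvId hd, pvId p))).filter (fun u => u.1 == pvId rc)
          = [] := by
        rw [List.filter_eq_nil_iff]
        intro u hu
        obtain ⟨p, _, rfl⟩ := List.mem_map.mp hu
        simp only [beq_iff_eq]
        intro he
        exact hnd.1 (he ▸ List.mem_map_of_mem htl)
      rw [h1, List.nil_append, ih hnd.2 htl]

theorem pvPass2 (m : Nat) :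
    (PySem.List.pyRange 0 (m : Int) 1).foldl (fun nb row =>
      (PySem.List.pyRange 0 (2 * row + 1) 1).foldl (fun nb col =>
        (pvRaw row col).foldl (fun nb p =>
          if (pvIM (m : Int)).contains p = true then
            if pvIn (m : Int) p = true then
              nb.modify ((pvIM (m : Int)).getD (row, col) 0) []
                (fun l => l ++ [(pvIM (m : Int)).getD p 0])
            else nb
          else nb) nb) nb) (pvNB0 (m : Int))
    = PySem.Dict.mk ((pvCells (m : Int)).map (fun rc =>
        (pvId rc, ((pvRaw rc.1 rc.2).filter (pvIn (m : Int))).map pvId))) := by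
  simp only [pvIf2, pvFoldFlat]
  have hupd : ((PySem.List.pyRange 0 (m : Int) 1).flatMap (fun row =>
      (PySem.List.pyRange 0 (2 * row + 1) 1).flatMap (fun col =>
        ((pvRaw row col).filter (fun p => (pvIM (m : Int)).contains p && pvIn (m : Int) p)).map
          (fun p => ((pvIM (m : Int)).getD (row, col) 0, (pvIM (m : Int)).getD p 0)))))
      = pvUpd (m : Int) := by
    rw [pvUpd, pvCells, List.flatMap_assoc]
    apply List.flatMap_congr
    intro row hrow
    rw [pvBlk, List.flatMap_map]
    apply List.flatMap_congr
    intro col hcol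
    have hcell : ((row, col) : Int × Int) ∈ pvCells (m : Int) := by
      rw [pvCells, List.mem_flatMap]
      exact ⟨row, hrow, by rw [pvBlk, List.mem_map]; exact ⟨col, hcol, rfl⟩⟩
    have hfil : (pvRaw row col).filter (fun p => (pvIM (m : Int)).contains p && pvIn (m : Int) p)
        = (pvRaw row col).filter (pvIn (m : Int)) := by
      apply List.filter_congr
      intro p _
      rw [pvIM_contains, Bool.and_self]
    rw [hfil]
    apply List.map_congr_left
    intro p hp
    have hpin : pvIn (m : Int) p = true := List.of_mem_filter hp
    have hpc : p ∈ pvCells (m : Int) := (pvMem_cells _ p).mpr hpin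
    rw [pvIM_getD m _ hcell, pvIM_getD m _ hpc]
  rw [hupd]
  -- now a single fold of modifies over pvUpd
  have hnd0 : (pvNB0 (m : Int)).keys.Nodup := by rw [pvNB0_keys]; exact pvNodup_ids m
  have hndk : ((pvUpd (m : Int)).foldl
      (fun d u => d.modify u.1 [] (fun lst => lst ++ [u.2])) (pvNB0 (m : Int))).keys.Nodup :=
    PySem.Dict.nodup_keys_foldl_modify_key _ Prod.fst [] (fun _ u => fun lst => lst ++ [u.2]) _ hnd0
  have hkeys : ((pvUpd (m : Int)).foldl
      (fun d u => d.modify u.1 [] (fun lst => lst ++ [u.2])) (pvNB0 (m : Int))).keys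
      = (pvCells (m : Int)).map pvId := by
    rw [PySem.Dict.keys_foldl_modify_key _ Prod.fst [] (fun _ u => fun lst => lst ++ [u.2]),
      PySem.Set.update_eq_append_filter, pvNB0_keys]
    have : (PySem.Set.ofList ((pvUpd (m : Int)).map Prod.fst)).filter
        (fun y => !PySem.Set.contains ((pvCells (m : Int)).map pvId) y) = [] := by
      rw [List.filter_eq_nil_iff]
      intro y hy
      have hy' : y ∈ (pvUpd (m : Int)).map Prod.fst := by
        have := PySem.Set.mem_ofList (xs := (pvUpd (m : Int)).map Prod.fst) (y := y)
        exact this.mp hy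
      obtain ⟨u, hu, rfl⟩ := List.mem_map.mp hy'
      obtain ⟨rc, hrc, he⟩ := pvUpd_fst _ u hu
      simp only [Bool.not_eq_true', Bool.not_eq_false]
      rw [he]
      have : pvId rc ∈ (pvCells (m : Int)).map pvId := List.mem_map_of_mem hrc
      exact List.elem_eq_true_of_mem this
    rw [this, List.append_nil]
  apply PySem.Dict.ext
  rw [PySem.Dict.items_eq_map_keys _ hndk ([] : List Int), hkeys, List.map_map]
  show _ = (pvCells (m : Int)).map (fun rc =>
    (pvId rc, ((pvRaw rc.1 rc.2).filter (pvIn (m : Int))).map pvId))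
  apply List.map_congr_left
  intro rc hrc
  simp only [Function.comp_def]
  refine Prod.ext rfl ?_
  show ((pvUpd (m : Int)).foldl (fun d u => d.modify u.1 [] (fun lst => lst ++ [u.2]))
      (pvNB0 (m : Int))).getD (pvId rc) [] = _
  rw [PySem.Dict.getD_foldl_modify_append, pvNB0_getD m rc hrc, List.nil_append, pvUpd,
    pvFilterBlocks _ _ rc (pvNodup_ids m) hrc, List.map_map]
  rfl

theorem pvLen (m : Nat) : ((pvCells (m : Int)).length : Int) = (m : Int) * (m : Int) := by
  rw [show (pvCells (m : Int)).length = ((pvCells (m : Int)).map pvId).length from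
      (List.length_map _).symm,
    pvCells_map_id, PySem.List.length_pyRange_one]
  rw [Int.sub_zero, Int.toNat_of_nonneg (by positivity)]

-- ===== B-side lemmas =====

-- B's loop step (the lambda in generate_triangular_grid_alt)
def pvStepB (n : Int) (s : List (Int × List Int) × Int × Int) (t : Int) :
    List (Int × List Int) × Int × Int :=
  let rc := if s.2.2 == 2 * s.2.1 + 1 then (s.2.1 + 1, (0 : Int)) else (s.2.1, s.2.2)
  let row := rc.1
  let col := rc.2
  let adj := (if col > 0 then [t - 1] else []) ++
    (if col < 2 * row then [t + 1] else []) ++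
    (if PySem.Int.mod col 2 == 1 then [t - 2 * row]
     else if row + 1 < n then [t + 2 * row + 2] else [])
  (s.1 ++ [(t, adj)], row, col + 1)

-- B's output entry for the triangle at (r, c), t = r*r + c
def pvOutB (n r c : Int) : Int × List Int :=
  (r * r + c,
    (if c > 0 then [r * r + c - 1] else []) ++
    (if c < 2 * r then [r * r + c + 1] else []) ++
    (if PySem.Int.mod c 2 == 1 then [r * r + c - 2 * r]
     else if r + 1 < n then [r * r + c + 2 * r + 2] else []))

theorem pvStepB_eq (n r c : Int) (hc : c < 2 * r + 1)
    (nb : List (Int × List Int)) :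
    pvStepB n (nb, r, c) (r * r + c) = (nb ++ [pvOutB n r c], r, c + 1) := by
  unfold pvStepB pvOutB
  have : (c == 2 * r + 1) = false := by simp; omega
  simp only [this, Bool.false_eq_true, if_false]

-- within a row, from col j ≥ 1, no reset fires
theorem pvRowTail (n r : Int) (k : Nat) (j : Int) (hr : 0 ≤ r) (hj : 1 ≤ j)
    (hjk : j + k ≤ 2 * r + 1) (nb : List (Int × List Int)) :
    (PySem.List.pyRange (r * r + j) (r * r + j + (k : Int)) 1).foldl (pvStepB n) (nb, r, j)
    = (nb ++ (List.range k).map (fun (i : Nat) => pvOutB n r (j + (i : Int))), r, j + (k : Int)) := by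
  induction k generalizing nb j with
  | zero => simp
  | succ k ih =>
    rw [show (r * r + j + ((k + 1 : Nat) : Int)) = (r * r + j + (k : Int)) + 1 by push_cast; ring,
      PySem.List.pyRange_one_succ_right (by omega), List.foldl_append,
      ih j hj (by push_cast at hjk ⊢; omega) nb]
    simp only [List.foldl_cons, List.foldl_nil]
    rw [show r * r + j + (k : Int) = r * r + (j + (k : Int)) by ring,
      pvStepB_eq n r (j + (k : Int)) (by push_cast at hjk; omega)]
    refine Prod.ext ?_ (Prod.ext rfl (by push_cast; ring))
    show nb ++ _ ++ [pvOutB n r (j + (k : Int))] = nb ++ _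
    rw [List.range_succ, List.map_append, List.append_assoc]
    rfl

-- B's fold over one full row r, starting from the end state of the previous rows
theorem pvRowB (n : Int) (m : Nat) (nb : List (Int × List Int)) :
    (PySem.List.pyRange ((m : Int) * (m : Int)) (((m : Int) + 1) * ((m : Int) + 1)) 1).foldl
      (pvStepB n)
      (nb, if m = 0 then ((0 : Int), (0 : Int)) else ((m : Int) - 1, 2 * ((m : Int) - 1) + 1))
    = (nb ++ ((PySem.List.pyRange 0 (2 * (m : Int) + 1) 1).map (fun c => pvOutB n (m : Int) c)),
       (m : Int), 2 * (m : Int) + 1) := by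
  have hcons : PySem.List.pyRange ((m : Int) * (m : Int)) (((m : Int) + 1) * ((m : Int) + 1)) 1
      = (m : Int) * (m : Int) ::
        PySem.List.pyRange ((m : Int) * (m : Int) + 1) (((m : Int) + 1) * ((m : Int) + 1)) 1 := by
    rw [PySem.List.pyRange_one_cons (by nlinarith [Int.natCast_nonneg m])]
  rw [hcons]
  simp only [List.foldl_cons]
  -- the first step of the row: the reset (for m > 0) or the untouched initial state (m = 0)
  have hfirst : pvStepB n
      ((nb, if m = 0 then ((0 : Int), (0 : Int)) else ((m : Int) - 1, 2 * ((m : Int) - 1) + 1)))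
      ((m : Int) * (m : Int))
      = (nb ++ [pvOutB n (m : Int) 0], (m : Int), 1) := by
    rcases Nat.eq_zero_or_pos m with rfl | hm
    · have := pvStepB_eq n 0 0 (by omega) nb
      simpa using this
    · rw [if_neg (by omega)]
      unfold pvStepB
      have hbeq : ((2 * ((m : Int) - 1) + 1) == 2 * ((m : Int) - 1) + 1) = true := by simp
      simp only [hbeq, if_true]
      have : (m : Int) - 1 + 1 = (m : Int) := by ring
      rw [this]
      have := pvStepB_eq n (m : Int) 0 (by positivity) nb
      unfold pvStepB at this
      have hb0 : ((0 : Int) == 2 * (m : Int) + 1) = false := by simp; omega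
      simp only [hb0, Bool.false_eq_true, if_false] at this
      simpa using this
  rw [hfirst]
  -- the rest of the row: cols 1 .. 2m
  have := pvRowTail n (m : Int) (2 * m) 1 (Int.natCast_nonneg m) (le_refl 1)
    (by push_cast; omega) (nb ++ [pvOutB n (m : Int) 0])
  rw [show (m : Int) * (m : Int) + 1 + ((2 * m : Nat) : Int) = ((m:Int)+1) * ((m:Int)+1) by push_cast; ring] at this
  rw [this]
  refine Prod.ext ?_ (Prod.ext rfl (by push_cast; ring))
  show nb ++ [pvOutB n (m : Int) 0] ++ _ = _
  rw [List.append_assoc]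
  congr 1
  -- [out 0] ++ map over range (2m) of (1 + i)  =  map over pyRange 0 (2m+1)
  have hmapeq : ((PySem.List.pyRange 0 (2 * (m : Int) + 1) 1).map (fun c => pvOutB n (m : Int) c))
      = pvOutB n (m : Int) 0
        :: (List.range (2 * m)).map (fun (i : Nat) => pvOutB n (m : Int) (1 + (i : Int))) := by
    rw [show (2 * (m : Int) + 1) = ((2 * m + 1 : Nat) : Int) by push_cast; ring,
      PySem.List.pyRange_zero_nat, List.map_map, List.range_succ_eq_map, List.map_cons,
      List.map_map]
    simp only [Function.comp_def]
    congr 1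
    apply List.map_congr_left
    intro a _
    congr 1
    push_cast [Nat.succ_eq_add_one]
    ring
  rw [hmapeq]
  simp

-- B's fold over all ids 0 .. m*m - 1
theorem pvFoldB (n : Int) (m : Nat) :
    (PySem.List.pyRange 0 ((m : Int) * (m : Int)) 1).foldl (pvStepB n)
      (([] : List (Int × List Int)), (0 : Int), (0 : Int))
    = ((pvCells (m : Int)).map (fun rc => pvOutB n rc.1 rc.2),
       if m = 0 then ((0 : Int), (0 : Int)) else ((m : Int) - 1, 2 * ((m : Int) - 1) + 1)) := by
  induction m with
  | zero =>
    simp [PySem.List.pyRange_one_eq_nil (le_refl (0 : Int)), pvCells]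
  | succ m ih =>
    rw [show (((m + 1 : Nat)) : Int) * (((m + 1 : Nat)) : Int)
        = ((m : Int) + 1) * ((m : Int) + 1) by push_cast; ring,
      PySem.List.pyRange_one_append 0 ((m : Int) * (m : Int)) (((m : Int) + 1) * ((m : Int) + 1))
        (by positivity) (by nlinarith [Int.natCast_nonneg m]),
      List.foldl_append, ih, pvRowB n m _]
    rw [show ((m + 1 : Nat) : Int) = (m : Int) + 1 by push_cast; ring, pvCells_succ m]
    refine Prod.ext ?_ ?_
    · show _ ++ _ = _
      rw [List.map_append]
      congr 1
      rw [pvBlk, List.map_map]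
      rfl
    · rw [if_neg (by omega)]
      refine Prod.ext (by push_cast; ring) (by push_cast; ring)

-- per-cell agreement: B's arithmetic adjacency equals A's filtered coordinate adjacency
theorem pvCellEq (n r c : Int) (hr : 0 ≤ r) (hrn : r < n) (hc : 0 ≤ c) (hc2 : c ≤ 2 * r) :
    pvOutB n r c = (pvId (r, c), ((pvRaw r c).filter (pvIn n)).map pvId) := by
  have hmod := PySem.Int.mod_two_eq c
  refine Prod.ext rfl ?_
  show _ = ((pvRaw r c).filter (pvIn n)).map pvId
  have hin1 : pvIn n (r, c - 1) = decide (c > 0) := by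
    simp only [pvIn]
    by_cases h : c > 0 <;> simp [h] <;> omega
  have hin2 : pvIn n (r, c + 1) = decide (c < 2 * r) := by
    simp only [pvIn]
    by_cases h : c < 2 * r <;> simp [h] <;> omega
  have hleft : (([(r, c - 1), (r, c + 1)] : List (Int × Int)).filter (pvIn n)).map pvId
      = (if c > 0 then [r * r + c - 1] else []) ++ (if c < 2 * r then [r * r + c + 1] else []) := by
    simp only [List.filter, hin1, hin2]
    by_cases h : c > 0 <;> by_cases h' : c < 2 * r <;>
      simp [h, h', pvId] <;> first | (constructor <;> ring) | ring
  have hright : ((if PySem.Int.mod c 2 == 1 then [(r - 1, c - 1)]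
        else [(r + 1, c + 1)] : List (Int × Int)).filter (pvIn n)).map pvId
      = (if PySem.Int.mod c 2 == 1 then [r * r + c - 2 * r]
         else if r + 1 < n then [r * r + c + 2 * r + 2] else []) := by
    by_cases hodd : PySem.Int.mod c 2 = 1
    · have he : c % 2 = 1 := by
        rw [← PySem.Int.mod_eq_emod_of_pos (by norm_num : (0:Int) < 2)]; exact hodd
      have hin : pvIn n (r - 1, c - 1) = true := by
        simp only [pvIn]; simp; omega
      simp only [hodd, beq_self_eq_true, if_true, List.filter, hin, List.map_cons, List.map_nil]
      simp [pvId]; ring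
    · have hmod0 : PySem.Int.mod c 2 = 0 := by rcases hmod with h | h; exact h; omega
      have hbeq : (PySem.Int.mod c 2 == 1) = false := by rw [hmod0]; rfl
      have hin : pvIn n (r + 1, c + 1) = decide (r + 1 < n) := by
        simp only [pvIn]
        by_cases h : r + 1 < n <;> simp [h] <;> omega
      simp only [hbeq, Bool.false_eq_true, if_false, List.filter, hin]
      by_cases h : r + 1 < n <;> simp [h, pvId] <;> ring
  show (if c > 0 then [r * r + c - 1] else []) ++ (if c < 2 * r then [r * r + c + 1] else []) ++ _ = _
  rw [pvRaw, List.filter_append, List.map_append, hleft, hright]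

theorem pvAltEq (n : Int) :
    generate_triangular_grid_alt n
    = (if n > 0 then n * n else 0,
       ((PySem.List.pyRange 0 (if n > 0 then n * n else 0) 1).foldl (pvStepB n)
         (([] : List (Int × List Int)), (0 : Int), (0 : Int))).1) := rfl

theorem pvMain (m : Nat) :
    generate_triangular_grid (m : Int) = generate_triangular_grid_alt (m : Int) := by
  simp only [generate_triangular_grid]
  rw [pvPass1]
  dsimp only
  rw [show PySem.Dict.mk ((pvCells (m : Int)).map (fun rc => (rc, pvId rc))) = pvIM (m : Int)
      from rfl]
  rw [show PySem.Dict.mk ((pvCells (m : Int)).map (fun rc => (pvId rc, ([] : List Int))))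
      = pvNB0 (m : Int) from rfl]
  simp only [show ∀ p : Int × Int,
      (decide (0 ≤ p.1) && decide (p.1 < (m : Int)) && decide (0 ≤ p.2)
        && decide (p.2 < 2 * p.1 + 1)) = pvIn (m : Int) p from fun _ => rfl]
  simp only [show ∀ row col : Int,
      ([(row, col - 1), (row, col + 1)] ++
        if (PySem.Int.mod col 2 == 1) = true then [(row - 1, col - 1)] else [(row + 1, col + 1)])
      = pvRaw row col from fun _ _ => rfl]
  rw [pvPass2]
  -- B side
  have hsize : (if (m : Int) > 0 then (m : Int) * (m : Int) else 0) = (m : Int) * (m : Int) := by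
    rcases Nat.eq_zero_or_pos m with rfl | hm
    · simp
    · rw [if_pos (by exact_mod_cast hm)]
  rw [pvAltEq, hsize, pvFoldB (m : Int) m]
  refine Prod.ext ?_ ?_
  · show ((pvCells (m : Int)).length : Int) = (m : Int) * (m : Int)
    exact pvLen m
  · show (PySem.Dict.mk ((pvCells (m : Int)).map (fun rc =>
        (pvId rc, ((pvRaw rc.1 rc.2).filter (pvIn (m : Int))).map pvId)))).items
      = (pvCells (m : Int)).map (fun rc => pvOutB (m : Int) rc.1 rc.2)
    show ((pvCells (m : Int)).map (fun rc =>
        (pvId rc, ((pvRaw rc.1 rc.2).filter (pvIn (m : Int))).map pvId)))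
      = (pvCells (m : Int)).map (fun rc => pvOutB (m : Int) rc.1 rc.2)
    apply List.map_congr_left
    intro rc hrc
    have h := (pvMem_cells _ rc).mp hrc
    simp only [pvIn, Bool.and_eq_true, decide_eq_true_eq] at h
    rw [pvCellEq (m : Int) rc.1 rc.2 h.1.1.1 h.1.1.2 h.1.2 (by omega)]

theorem pvNeg (n : Int) (h : n < 0) :
    generate_triangular_grid n = generate_triangular_grid_alt n := by
  simp only [generate_triangular_grid, generate_triangular_grid_alt,
    PySem.List.pyRange_one_eq_nil h.le, List.foldl_nil]
  rw [if_neg (by omega : ¬ n > 0)]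
  simp [PySem.Dict.empty, PySem.List.pyRange_one_eq_nil (le_refl (0 : Int))]

-- ===== VERDICT (by name: the statement is the Claim_ definition above) =====
theorem generate_triangular_grid_spec : Claim_equal_generate_triangular_grid := by
  intro n _
  unfold Spec_generate_triangular_grid
  rcases (by omega : 0 ≤ n ∨ n < 0) with h | h
  · lift n to Nat using h with m
    exact pvMain m
  · exact pvNeg n h
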